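-- pv_equiv track=rewrite | github.com/Damiryh/surf-chip8 | surf-chip8/chip8-asm/main.py | trim_left
-- ===== SOURCE A (Python) =====
-- def trim_left(src, pos, line, column):
--     for i in range(pos, len(src)):
--         if src[i] == '\n':
--             column = 1
--             line += 1
--         if not src[i].isspace(): break
--     else: i = len(src)
--     return (None, i, line, column)
-- ===== SOURCE B (Python) =====
-- def trim_left(src, pos, line, column):
--     n = len(src)
--     i = min(pos, n)
--     while i < n and src[i].isspace():
--         i += 1
--     nl = sum(1 for j in range(pos, i) if src[j] == '\n')
--     if nl:
--         line += nl
--         column = 1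
--     return (None, i, line, column)
-- ===== Notes on version B (the rewrite author's own statement) =====
-- stated objective: alternative
-- what changed: Replaces A's single fused for/else loop that updates line/column inline per character with a clamp-then-scan that only advances the index past whitespace, followed by a separate newline-counting pass over the skipped range and one conditional line/column update.
import Mathlib
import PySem

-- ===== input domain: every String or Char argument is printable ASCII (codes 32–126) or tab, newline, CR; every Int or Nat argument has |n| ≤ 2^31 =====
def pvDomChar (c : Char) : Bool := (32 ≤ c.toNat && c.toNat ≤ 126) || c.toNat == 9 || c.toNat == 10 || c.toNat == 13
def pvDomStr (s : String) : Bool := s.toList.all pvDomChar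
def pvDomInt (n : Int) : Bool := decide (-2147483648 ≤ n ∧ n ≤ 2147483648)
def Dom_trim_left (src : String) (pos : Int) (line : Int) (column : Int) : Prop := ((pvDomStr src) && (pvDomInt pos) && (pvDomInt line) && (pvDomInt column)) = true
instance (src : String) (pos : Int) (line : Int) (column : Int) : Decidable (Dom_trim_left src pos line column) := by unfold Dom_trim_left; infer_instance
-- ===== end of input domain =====

-- B replaces A's single fused for/else loop (inline line/column updates per char) by a clamp-then-scan
-- of the index past whitespace followed by a separate newline-counting pass; alternative decomposition,
-- same cost. Return values only; neither version mutates its arguments.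

-- ===== PORT A =====
-- A's for-loop over range(pos, len(src)) with break and for/else; 'none' result = IndexError.
def trimLeftLoopA (src : List Char) (fallback : Int) : List Int → Int → Int → Option (Int × Int × Int)
  | [], line, column => some (fallback, line, column)
  | i :: rest, line, column =>
    match PySem.List.pyGet? src i with
    | none => none
    | some c =>
      let line' := if c = '\n' then line + 1 else line
      let column' := if c = '\n' then 1 else column
      if ¬ PySem.Chars.isspace c then some (i, line', column')
      else trimLeftLoopA src fallback rest line' column'

def trim_left (src : String) (pos : Int) (line : Int) (column : Int) : Option String × Int × Int × Int :=
  let s := src.toList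
  match trimLeftLoopA s (s.length : Int) (PySem.List.pyRange pos (s.length : Int) 1) line column with
  | some (i, l, c) => (none, i, l, c)
  | none => (none, 0, 0, 0)  -- IndexError; excluded by Pre_trim_left

-- ===== PORT B =====
-- B's while-scan: advance i past whitespace (fuel = remaining distance, exact on the scanned range).
def trimLeftScanB (src : List Char) : Nat → Int → Int
  | 0, i => i
  | fuel + 1, i =>
    if i < (src.length : Int) then
      match PySem.List.pyGet? src i with
      | some c => if PySem.Chars.isspace c then trimLeftScanB src fuel (i + 1) else i
      | none => i  -- IndexError in Python B; excluded by Pre_trim_left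
    else i

-- B's newline count: sum(1 for j in range(pos, i) if src[j] == '\n')
def trimLeftCountB (src : List Char) (lo hi : Int) : Int :=
  (PySem.List.pyRange lo hi 1).foldl
    (fun acc j => if PySem.List.pyGet? src j = some '\n' then acc + 1 else acc) 0

def trim_left_alt (src : String) (pos : Int) (line : Int) (column : Int) : Option String × Int × Int × Int :=
  let s := src.toList
  let n : Int := s.length
  let i := trimLeftScanB s (n - min pos n).toNat (min pos n)
  let nl := trimLeftCountB s pos i
  if nl ≠ 0 then (none, i, line + nl, 1) else (none, i, line, column)

-- ===== PRECONDITION & SPEC =====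
-- Pre_ excludes exactly the inputs where A (and B) raise IndexError: pos below -len(src).
def Pre_trim_left (src : String) (pos : Int) (line : Int) (column : Int) : Prop :=
  -(src.toList.length : Int) ≤ pos
instance (src : String) (pos : Int) (line : Int) (column : Int) : Decidable (Pre_trim_left src pos line column) := by unfold Pre_trim_left; infer_instance

def pvWitness_trim_left : String × Int × Int × Int := ("  \n x", 0, 1, 1)

def Spec_trim_left (src : String) (pos : Int) (line : Int) (column : Int) (out : Option String × Int × Int × Int) : Prop := out = trim_left_alt src pos line column
instance (src : String) (pos : Int) (line : Int) (column : Int) (out : Option String × Int × Int × Int) : Decidable (Spec_trim_left src pos line column out) := by unfold Spec_trim_left; infer_instance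

-- ===== CLAIM (what is proved, stated in full; the proofs are below) =====
def Claim_equal_trim_left : Prop := ∀ (src : String) (pos : Int) (line : Int) (column : Int), Dom_trim_left src pos line column → Pre_trim_left src pos line column → Spec_trim_left src pos line column (trim_left src pos line column)

-- ===== LEMMAS AND PROOFS =====

-- the scan result never moves below its start
theorem trimLeftScanB_ge (src : List Char) (fuel : Nat) (i : Int) :
    i ≤ trimLeftScanB src fuel i := by
  induction fuel generalizing i with
  | zero => simp [trimLeftScanB]
  | succ k ih =>
    simp only [trimLeftScanB]
    split
    · cases h : PySem.List.pyGet? src i with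
      | none => simp
      | some c =>
        by_cases hs : PySem.Chars.isspace c
        · simp only [hs, if_true]
          have := ih (i + 1); omega
        · simp [hs]
  -- else branch
    · omega

-- counts are nonnegative (foldl with +1/skip from a nonnegative accumulator)
theorem countB_aux_ge (src : List Char) (l : List Int) (a : Int) :
    a ≤ l.foldl (fun acc j => if PySem.List.pyGet? src j = some '\n' then acc + 1 else acc) a := by
  induction l generalizing a with
  | nil => simp
  | cons x xs ih =>
    simp only [List.foldl_cons]
    split
    · have := ih (a + 1); omega
    · exact ih a

-- pull the accumulator out of the counting fold
theorem countB_aux_shift (src : List Char) (l : List Int) (a : Int) :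
    l.foldl (fun acc j => if PySem.List.pyGet? src j = some '\n' then acc + 1 else acc) a
      = a + l.foldl (fun acc j => if PySem.List.pyGet? src j = some '\n' then acc + 1 else acc) 0 := by
  induction l generalizing a with
  | nil => simp
  | cons x xs ih =>
    simp only [List.foldl_cons]
    by_cases h : PySem.List.pyGet? src x = some '\n'
    · rw [if_pos h, if_pos h, ih (a + 1), ih (0 + 1)]; ring
    · rw [if_neg h, if_neg h, ih a]

theorem trimLeftCountB_nonneg (src : List Char) (lo hi : Int) :
    0 ≤ trimLeftCountB src lo hi := countB_aux_ge src _ 0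

theorem trimLeftCountB_cons (src : List Char) (lo hi : Int) (h : lo < hi) :
    trimLeftCountB src lo hi
      = (if PySem.List.pyGet? src lo = some '\n' then 1 else 0) + trimLeftCountB src (lo + 1) hi := by
  unfold trimLeftCountB
  rw [PySem.List.pyRange_one_cons h, List.foldl_cons]
  by_cases hc : PySem.List.pyGet? src lo = some '\n'
  · rw [if_pos hc, if_pos hc, countB_aux_shift]; ring
  · simp [hc]

theorem trimLeftCountB_empty (src : List Char) (lo hi : Int) (h : hi ≤ lo) :
    trimLeftCountB src lo hi = 0 := by
  unfold trimLeftCountB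
  rw [PySem.List.pyRange_one_eq_nil h]; rfl

-- main invariant: from any in-range start j ≤ n, A's fused loop from j equals
-- (B's scan from j, line + newline count over [j, scan), column reset iff that count ≠ 0)
theorem loop_eq_scan (src : List Char) (fuel : Nat) (j line column : Int)
    (hlo : -(src.length : Int) ≤ j) (hhi : j ≤ (src.length : Int))
    (hfuel : ((src.length : Int) - j).toNat ≤ fuel) :
    trimLeftLoopA src (src.length : Int) (PySem.List.pyRange j (src.length : Int) 1) line column
      = some (trimLeftScanB src fuel j,
              line + trimLeftCountB src j (trimLeftScanB src fuel j),
              if trimLeftCountB src j (trimLeftScanB src fuel j) ≠ 0 then 1 else column) := by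
  induction fuel generalizing j line column with
  | zero =>
    -- fuel 0 forces j = n
    have hj : j = (src.length : Int) := by omega
    subst hj
    rw [PySem.List.pyRange_one_eq_nil le_rfl]
    simp [trimLeftLoopA, trimLeftScanB, trimLeftCountB_empty src _ _ le_rfl]
  | succ k ih =>
    by_cases hlt : j < (src.length : Int)
    · -- in-range step
      rw [PySem.List.pyRange_one_cons hlt]
      have hget : ∃ c, PySem.List.pyGet? src j = some c := by
        cases h : PySem.List.pyGet? src j with
        | none =>
          exfalso
          rw [PySem.List.pyGet?_eq_none_iff] at h
          exact h ⟨hlo, hlt⟩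
        | some c => exact ⟨c, rfl⟩
      obtain ⟨c, hc⟩ := hget
      simp only [trimLeftLoopA, hc, trimLeftScanB, if_pos hlt]
      by_cases hs : PySem.Chars.isspace c
      · -- whitespace: recurse on both sides
        simp only [hs, not_true, if_false, if_true]
        have hrec := ih (j + 1) (if c = '\n' then line + 1 else line)
          (if c = '\n' then 1 else column) (by omega) (by omega) (by omega)
        rw [hrec]
        have hge : j + 1 ≤ trimLeftScanB src k (j + 1) := trimLeftScanB_ge src k (j + 1)
        have hcnt : trimLeftCountB src j (trimLeftScanB src k (j + 1))
            = (if PySem.List.pyGet? src j = some '\n' then 1 else 0)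
              + trimLeftCountB src (j + 1) (trimLeftScanB src k (j + 1)) := by
          exact trimLeftCountB_cons src j _ (by omega)
        have hnn : 0 ≤ trimLeftCountB src (j + 1) (trimLeftScanB src k (j + 1)) :=
          trimLeftCountB_nonneg src _ _
        by_cases hnl : c = '\n'
        · subst hnl
          rw [if_pos hc] at hcnt
          rw [hcnt]
          have h1 : (1 + trimLeftCountB src (j + 1) (trimLeftScanB src k (j + 1))) ≠ 0 := by omega
          simp [h1]
          omega
        · have hcj : PySem.List.pyGet? src j ≠ some '\n' := by
            rw [hc]; intro h; exact hnl (Option.some.injEq _ _ ▸ h)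
          rw [if_neg hcj] at hcnt
          simp only [if_neg hnl]
          rw [hcnt]; ring_nf
      · -- non-whitespace: break; c ≠ '\n' since '\n' is whitespace
        have hnl : c ≠ '\n' := by
          intro h; subst h; exact hs (by decide)
        have hcnt0 : trimLeftCountB src j j = 0 := trimLeftCountB_empty src j j le_rfl
        simp [hs, hnl, hcnt0]
  -- j = n: empty range on both sides
    · have hj : j = (src.length : Int) := by omega
      subst hj
      rw [PySem.List.pyRange_one_eq_nil le_rfl]
      simp only [trimLeftLoopA, trimLeftScanB, lt_irrefl, if_false]
      rw [trimLeftCountB_empty src _ _ le_rfl]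
      simp

-- ===== VERDICT (by name: the statement is the Claim_ definition above) =====
theorem trim_left_spec : Claim_equal_trim_left := by
  intro src pos line column _hdom hpre
  unfold Spec_trim_left
  have hpre' : -(src.toList.length : Int) ≤ pos := hpre
  by_cases hle : pos ≤ (src.toList.length : Int)
  · -- pos in [-n, n]: min pos n = pos, apply the invariant
    have hmin : min pos (src.toList.length : Int) = pos := min_eq_left hle
    simp only [trim_left, trim_left_alt, hmin]
    rw [loop_eq_scan src.toList (((src.toList.length : Int) - pos).toNat) pos line column hpre'
      hle le_rfl]
    dsimp only
    split <;> simp_all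
  · -- pos > n: both ranges are empty and the scan starts (and stays) at n
    rw [not_le] at hle
    have hmin : min pos (src.toList.length : Int) = (src.toList.length : Int) :=
      min_eq_right (le_of_lt hle)
    have h0 : ((src.toList.length : Int) - (src.toList.length : Int)).toNat = 0 := by omega
    simp only [trim_left, trim_left_alt, hmin, h0]
    rw [PySem.List.pyRange_one_eq_nil (le_of_lt hle)]
    have hscan : trimLeftScanB src.toList 0 (src.toList.length : Int) = (src.toList.length : Int) := rfl
    rw [hscan, trimLeftCountB_empty src.toList pos _ (le_of_lt hle)]
    simp [trimLeftLoopA]
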